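-- pv_equiv track=rewrite | github.com/Meaningful-Data/vtlengine | src/vtlengine/DataTypes/_time_checking.py | _truncate_nanoseconds
-- ===== SOURCE A (Python) =====
-- def _truncate_nanoseconds(value: str) -> str:
--     """Truncate sub-second precision beyond 6 digits (microseconds) for Python compatibility."""
--     dot_idx = value.find(".")
--     if dot_idx == -1:
--         return value
--     # Keep at most 6 decimal digits after the dot
--     frac_end = dot_idx + 1
--     while frac_end < len(value) and value[frac_end].isdigit():
--         frac_end += 1
--     frac_digits = value[dot_idx + 1 : frac_end]
--     if len(frac_digits) > 6:
--         return value[:dot_idx] + "." + frac_digits[:6] + value[frac_end:]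
--     return value
-- ===== SOURCE B (Python) =====
-- def _truncate_nanoseconds(value: str) -> str:
--     """Truncate sub-second precision beyond 6 digits (microseconds) for Python compatibility."""
--     out = []
--     state = 0  # 0: before the first dot, 1: in the fractional digit run, 2: after the run
--     kept = 0
--     for c in value:
--         if state == 0:
--             out.append(c)
--             if c == ".":
--                 state = 1
--         elif state == 1:
--             if c.isdigit():
--                 kept += 1
--                 if kept <= 6:
--                     out.append(c)
--             else:
--                 state = 2
--                 out.append(c)
--         else:
--             out.append(c)
--     return "".join(out)
-- ===== Notes on version B (the rewrite author's own statement) =====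
-- stated objective: alternative
-- what changed: Replaces A's find/index-scan/slice-and-concatenate logic with a single left-to-right pass: a three-state machine (before first dot / inside the fractional digit run / after it) that emits characters directly, dropping fractional digits past the sixth.
import Mathlib
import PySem

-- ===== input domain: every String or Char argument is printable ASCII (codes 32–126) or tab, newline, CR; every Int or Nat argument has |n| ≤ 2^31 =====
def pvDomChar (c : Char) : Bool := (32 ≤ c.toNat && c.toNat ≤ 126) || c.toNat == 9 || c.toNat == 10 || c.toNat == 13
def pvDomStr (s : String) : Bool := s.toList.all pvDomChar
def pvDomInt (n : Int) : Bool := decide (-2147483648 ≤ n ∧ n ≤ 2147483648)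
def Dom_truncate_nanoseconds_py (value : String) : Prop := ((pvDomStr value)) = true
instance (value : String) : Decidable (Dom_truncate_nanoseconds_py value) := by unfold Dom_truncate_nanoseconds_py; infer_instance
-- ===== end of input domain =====

-- B replaces A's find/scan/slice-and-concatenate with a one-pass three-state machine that
-- emits the output directly (alternative decomposition, same O(n) cost).

-- ===== PORT A =====
-- the `while frac_end < len(value) and value[frac_end].isdigit(): frac_end += 1` loop;
-- fuel = len(value) - frac_end, so fuel = 0 exactly when the bound check fails
def pvA_loop (l : List Char) : Nat → Nat → Nat
  | fe, 0 => fe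
  | fe, fuel + 1 =>
    match PySem.List.pyGet? l (fe : Int) with
    | some c => if PySem.Chars.isdigit c then pvA_loop l (fe + 1) fuel else fe
    | none => fe

def truncate_nanoseconds_py (value : String) : String :=
  let dot_idx : Int := PySem.Str.find value "."
  if dot_idx = -1 then value
  else
    let l := value.toList
    let d := dot_idx.toNat
    let frac_end := pvA_loop l (d + 1) (l.length - (d + 1))
    let frac_digits := PySem.List.slice l (some ((d : Int) + 1)) (some (frac_end : Int))
    if frac_digits.length > 6 then
      String.ofList (PySem.List.slice l none (some (d : Int)) ++ ['.'] ++
        PySem.List.slice frac_digits none (some 6) ++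
        PySem.List.slice l (some (frac_end : Int)) none)
    else value

-- ===== PORT B =====
-- one step of the state machine: state 0 = before the first dot, 1 = in the fractional
-- digit run (kept = digits counted so far), 2 = after the run
def pvB_step (st : List Char × Int × Int) (c : Char) : List Char × Int × Int :=
  match st with
  | (out, state, kept) =>
    if state = 0 then
      (out ++ [c], if c = '.' then 1 else 0, kept)
    else if state = 1 then
      if PySem.Chars.isdigit c then
        let kept' := kept + 1
        (if kept' ≤ 6 then out ++ [c] else out, 1, kept')
      else
        (out ++ [c], 2, kept)
    else
      (out ++ [c], state, kept)

def truncate_nanoseconds_py_alt (value : String) : String :=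
  String.ofList (value.toList.foldl pvB_step ([], 0, 0)).1

-- ===== PRECONDITION & SPEC =====
def Spec_truncate_nanoseconds_py (value : String) (out : String) : Prop := out = truncate_nanoseconds_py_alt value
instance (value : String) (out : String) : Decidable (Spec_truncate_nanoseconds_py value out) := by unfold Spec_truncate_nanoseconds_py; infer_instance

-- ===== CLAIM (what is proved, stated in full; the proofs are below) =====
def Claim_equal_truncate_nanoseconds_py : Prop := ∀ (value : String), Dom_truncate_nanoseconds_py value → Spec_truncate_nanoseconds_py value (truncate_nanoseconds_py value)

-- ===== LEMMAS AND PROOFS =====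

-- B stays in state 0 over a dot-free prefix, copying it to the output
lemma pvB_state0 (a : List Char) (h : '.' ∉ a) (out : List Char) (kept : Int) :
    a.foldl pvB_step (out, 0, kept) = (out ++ a, 0, kept) := by
  induction a generalizing out with
  | nil => simp
  | cons c rest ih =>
    have hc : c ≠ '.' := by intro hc; exact h (hc ▸ List.mem_cons_self)
    simp [List.foldl_cons, pvB_step, hc, ih (fun hm => h (List.mem_cons_of_mem _ hm))]

-- B in state 2 copies the rest of the input
lemma pvB_state2 (r : List Char) (out : List Char) (kept : Int) :
    r.foldl pvB_step (out, 2, kept) = (out ++ r, 2, kept) := by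
  induction r generalizing out with
  | nil => simp
  | cons c rest ih => simp [List.foldl_cons, pvB_step, ih]

-- B in state 1 keeps the first 6 - k digits of the run, then copies the rest
lemma pvB_state1 (r : List Char) (out : List Char) (k : Nat) :
    (r.foldl pvB_step (out, 1, (k : Int))).1 =
      out ++ (r.takeWhile PySem.Chars.isdigit).take (6 - k) ++ r.dropWhile PySem.Chars.isdigit := by
  induction r generalizing out k with
  | nil => simp
  | cons c rest ih =>
    by_cases hd : PySem.Chars.isdigit c
    · by_cases hk : k < 6
      · have h6 : (k : Int) + 1 ≤ 6 := by exact_mod_cast Nat.succ_le_of_lt hk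
        have e1 : pvB_step (out, 1, (k : Int)) c = (out ++ [c], 1, ((k + 1 : Nat) : Int)) := by
          simp [pvB_step, hd, h6]
        rw [List.foldl_cons, e1, ih]
        have h7 : 6 - k = (6 - (k + 1)) + 1 := by omega
        simp [hd, h7]
      · have h6 : ¬ ((k : Int) + 1 ≤ 6) := by omega
        have e1 : pvB_step (out, 1, (k : Int)) c = (out, 1, ((k + 1 : Nat) : Int)) := by
          simp [pvB_step, hd, h6]
        rw [List.foldl_cons, e1, ih]
        have h1 : 6 - k = 0 := by omega
        have h2 : 6 - (k + 1) = 0 := by omega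
        simp [hd, h1, h2]
    · have e1 : pvB_step (out, 1, (k : Int)) c = (out ++ [c], 2, (k : Int)) := by
        simp [pvB_step, hd]
      rw [List.foldl_cons, e1, pvB_state2]
      simp [hd]
-- (the `if state = 0` / `if state = 1` branches reduce by `simp [pvB_step]` since 1 ≠ 0, 2 ≠ 0, 2 ≠ 1)

-- A's while-loop advances exactly over the digit run starting at fe
lemma pvA_loop_spec (l : List Char) (fuel fe : Nat) (h : fuel = l.length - fe) :
    pvA_loop l fe fuel = fe + ((l.drop fe).takeWhile PySem.Chars.isdigit).length := by
  induction fuel generalizing fe with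
  | zero =>
    have : l.length ≤ fe := by omega
    simp [pvA_loop, List.drop_eq_nil_of_le this]
  | succ fuel ih =>
    have hlt : fe < l.length := by omega
    have hget : PySem.List.pyGet? l (fe : Int) = some l[fe] := by
      simp [PySem.List.pyGet?_natCast, List.getElem?_eq_getElem hlt]
    have hdrop : l.drop fe = l[fe] :: l.drop (fe + 1) := List.drop_eq_getElem_cons hlt
    by_cases hd : PySem.Chars.isdigit l[fe]
    · simp only [pvA_loop, hget, hd, if_pos]
      rw [ih (fe + 1) (by omega), hdrop]
      simp only [List.takeWhile_cons, hd, if_pos, List.length_cons]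
      omega
    · simp only [pvA_loop, hget, hd]
      rw [hdrop]
      simp only [List.takeWhile_cons, hd, Bool.false_eq_true, ite_false,
        List.length_nil, Nat.add_zero]

-- ===== VERDICT (by name: the statement is the Claim_ definition above) =====
theorem truncate_nanoseconds_py_spec : Claim_equal_truncate_nanoseconds_py := by
  intro value _
  unfold Spec_truncate_nanoseconds_py truncate_nanoseconds_py truncate_nanoseconds_py_alt
  have hfind : PySem.Str.find value "." = PySem.Chars.find value.toList ['.'] := by
    simp
  set l := value.toList with hl
  by_cases h : PySem.Chars.find l ['.'] = -1
  · -- no dot: A returns value unchanged, B copies every character in state 0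
    have hno : ¬ (['.'] <:+: l) := (PySem.Chars.find_eq_neg_one_iff l ['.']).1 h
    have hmem : '.' ∉ l := fun hm => hno ((List.singleton_infix_iff '.' l).mpr hm)
    rw [hfind, if_pos h, pvB_state0 l hmem [] 0]
    exact (String.ofList_toList).symm
  · -- dot found at index n
    rw [hfind, if_neg h]
    have h0 : 0 ≤ PySem.Chars.find l ['.'] := by
      have := PySem.Chars.neg_one_le_find l ['.']
      omega
    set n := (PySem.Chars.find l ['.']).toNat with hn
    have hfn : PySem.Chars.find l ['.'] = (n : Int) := (Int.toNat_of_nonneg h0).symm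
    obtain ⟨hpre, hmin⟩ := PySem.Chars.find_spec h0
    have hnlen : n ≤ l.length := by
      have := PySem.Chars.find_le_length l ['.']
      omega
    obtain ⟨r, hr⟩ : ∃ r, l.drop n = '.' :: r := by
      obtain ⟨t, ht⟩ := hpre
      exact ⟨t, ht.symm⟩
    set a := l.take n with ha
    have hamem : '.' ∉ a := by
      intro hm
      obtain ⟨i, hi, hget⟩ := List.getElem_of_mem hm
      have hilt : i < n := by
        have := hi; simp [ha] at this; omega
      apply hmin i hilt
      have : l[i] = '.' := by
        rw [← hget]; simp [ha, List.getElem_take]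
      refine ⟨l.drop (i + 1), ?_⟩
      rw [← this]
      simp [(List.drop_eq_getElem_cons (show i < l.length by omega)).symm]
    have halen : a.length = n := by simp [ha]; omega
    have hla : l = a ++ '.' :: r := by
      rw [ha, ← hr, List.take_append_drop]
    have hdrop1 : l.drop (n + 1) = r := by
      have : l.drop (n + 1) = (l.drop n).drop 1 := by
        rw [List.drop_drop]
      rw [this, hr]; rfl
    set dr := r.takeWhile PySem.Chars.isdigit with hdr
    set dw := r.dropWhile PySem.Chars.isdigit with hdw
    have hrsplit : r = dr ++ dw := (List.takeWhile_append_dropWhile).symm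
    -- A's loop
    have hloop : pvA_loop l (n + 1) (l.length - (n + 1)) = (n + 1) + dr.length := by
      rw [pvA_loop_spec l _ _ rfl, hdrop1]
    -- frac_digits
    have htake : r.take dr.length = dr := by
      have := List.takeWhile_prefix (l := r) (p := PySem.Chars.isdigit)
      exact ((List.prefix_iff_eq_take).1 this).symm
    have hfrac : PySem.List.slice l (some ((n : Int) + 1)) (some (((n + 1) + dr.length : Nat) : Int)) = dr := by
      have hc : ((n : Int) + 1) = (((n + 1 : Nat)) : Int) := by push_cast; ring
      rw [hc, PySem.List.slice_natCast, hdrop1]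
      have : (n + 1) + dr.length - (n + 1) = dr.length := by omega
      rw [this, htake]
    have hdroptail : l.drop ((n + 1) + dr.length) = dw := by
      rw [← List.drop_drop, hdrop1, hrsplit, List.drop_left]
    -- B's fold
    have hB : (l.foldl pvB_step ([], 0, 0)).1 = a ++ '.' :: (dr.take 6 ++ dw) := by
      rw [hla, List.foldl_append, pvB_state0 a hamem [] 0, List.foldl_cons]
      have hstep : pvB_step ([] ++ a, 0, 0) '.' = (a ++ ['.'], 1, ((0 : Nat) : Int)) := by
        simp [pvB_step]
      rw [hstep, pvB_state1]
      simp [← hdr, ← hdw]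
    simp only [hloop]
    rw [hfrac]
    by_cases hlen : dr.length > 6
    · rw [if_pos (by omega)]
      rw [hB]
      congr 1
      rw [PySem.List.slice_to_natCast, PySem.List.slice_from_natCast, hdroptail,
        PySem.List.slice_to dr (by norm_num)]
      simp [← ha, List.append_assoc]
    · rw [if_neg (by omega)]
      have : dr.take 6 = dr := List.take_of_length_le (by omega)
      rw [hB, this, ← hrsplit, ← hla]
      exact (String.ofList_toList).symm
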